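-- pv_equiv track=rewrite | github.com/helloworld1l/AIAgent | knowledge_base/matlab_static_validator.py | _is_transpose_apostrophe
-- ===== SOURCE A (Python) =====
-- def _is_transpose_apostrophe(line: str, index: int) -> bool:
--     probe = index - 1
--     while probe >= 0 and line[probe].isspace():
--         probe -= 1
--     if probe < 0:
--         return False
--     prev_char = line[probe]
--     return prev_char.isalnum() or prev_char in ")]}.\"'"
-- ===== SOURCE B (Python) =====
-- def _is_transpose_apostrophe(line: str, index: int) -> bool:
--     if index <= 0:
--         return False
--     head = line[:index].rstrip()
--     if not head:
--         return False
--     c = head[-1]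
--     return c.isalnum() or c in ")]}.\"'"
-- ===== Notes on version B (the rewrite author's own statement) =====
-- stated objective: simpler
-- what changed: Replaces the backward index-walk over whitespace with building the trimmed prefix line[:index].rstrip() in one operation and classifying its last character.
import Mathlib
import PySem

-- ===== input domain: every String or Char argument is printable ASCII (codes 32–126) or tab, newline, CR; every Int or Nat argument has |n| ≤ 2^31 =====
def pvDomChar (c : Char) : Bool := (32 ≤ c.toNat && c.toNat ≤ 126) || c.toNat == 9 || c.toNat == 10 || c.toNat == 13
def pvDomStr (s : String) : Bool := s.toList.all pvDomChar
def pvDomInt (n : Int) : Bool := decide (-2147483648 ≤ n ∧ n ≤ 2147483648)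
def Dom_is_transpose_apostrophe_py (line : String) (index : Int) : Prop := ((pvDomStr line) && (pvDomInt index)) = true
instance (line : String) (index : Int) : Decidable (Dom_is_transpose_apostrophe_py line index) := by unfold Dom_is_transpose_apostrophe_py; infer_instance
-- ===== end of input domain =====

-- B builds the trimmed prefix line[:index].rstrip() once and classifies its last character,
-- instead of A's backward character-by-character whitespace walk (objective: simpler).


-- ===== PORT A =====
-- the 'while probe >= 0 and line[probe].isspace(): probe -= 1' loop; pyGetD is exact under Pre_ (probe < len whenever 0 ≤ probe)
def pvALoop (cs : List Char) (probe : Int) : Int :=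
  if h : 0 ≤ probe ∧ PySem.Chars.isspace (PySem.List.pyGetD cs probe ' ') then
    pvALoop cs (probe - 1)
  else probe
termination_by (probe + 1).toNat
decreasing_by omega

def is_transpose_apostrophe_py (line : String) (index : Int) : Bool :=
  let probe := pvALoop line.toList (index - 1)
  if probe < 0 then false
  else
    let prev := PySem.List.pyGetD line.toList probe ' '
    PySem.Chars.isalnum prev || [')', ']', '}', '.', '"', '\''].contains prev

-- ===== PORT B =====
def is_transpose_apostrophe_py_alt (line : String) (index : Int) : Bool :=
  if index ≤ 0 then false
  else
    let head := PySem.Chars.rstrip (PySem.List.slice line.toList none (some index))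
    match head.getLast? with
    | none => false
    | some c => PySem.Chars.isalnum c || [')', ']', '}', '.', '"', '\''].contains c

-- ===== PRECONDITION & SPEC =====
-- A raises IndexError exactly when index > len(line) (first probe is out of range); excluded here.
def Pre_is_transpose_apostrophe_py (line : String) (index : Int) : Prop :=
  index ≤ (line.toList.length : Int)
instance (line : String) (index : Int) : Decidable (Pre_is_transpose_apostrophe_py line index) := by unfold Pre_is_transpose_apostrophe_py; infer_instance

def pvWitness_is_transpose_apostrophe_py : String × Int := ("ab '", 3)

def Spec_is_transpose_apostrophe_py (line : String) (index : Int) (out : Bool) : Prop := out = is_transpose_apostrophe_py_alt line index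
instance (line : String) (index : Int) (out : Bool) : Decidable (Spec_is_transpose_apostrophe_py line index out) := by unfold Spec_is_transpose_apostrophe_py; infer_instance

-- ===== CLAIM (what is proved, stated in full; the proofs are below) =====
def Claim_equal_is_transpose_apostrophe_py : Prop := ∀ (line : String) (index : Int), Dom_is_transpose_apostrophe_py line index → Pre_is_transpose_apostrophe_py line index → Spec_is_transpose_apostrophe_py line index (is_transpose_apostrophe_py line index)

-- ===== LEMMAS AND PROOFS =====

theorem pvALoop_neg (cs : List Char) (p : Int) (hp : p < 0) : pvALoop cs p = p := by
  unfold pvALoop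
  rw [dif_neg]
  intro h
  omega

theorem pvRstrip_append (pref : List Char) (c : Char) :
    PySem.Chars.rstrip (pref ++ [c]) =
      if PySem.Chars.isspace c then PySem.Chars.rstrip pref else pref ++ [c] := by
  by_cases hc : PySem.Chars.isspace c <;>
    simp [PySem.Chars.rstrip, hc]

theorem pvRstrip_prefix (pref : List Char) : PySem.Chars.rstrip pref <+: pref := by
  rw [PySem.Chars.rstrip, ← List.reverse_reverse pref, List.reverse_prefix,
    List.reverse_reverse]
  exact List.dropWhile_suffix _

-- reading cs at the last position of a nonempty prefix gives that prefix's last element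
theorem pvGet_last_of_prefix (cs q : List Char) (h : q <+: cs) (hne : q ≠ []) :
    PySem.List.pyGetD cs ((q.length : Int) - 1) ' ' = q.getLast hne := by
  obtain ⟨t, rfl⟩ := h
  have h1 : 1 ≤ q.length := List.length_pos_iff.mpr hne
  have : ((q.length : Int) - 1) = ((q.length - 1 : Nat) : Int) := by omega
  rw [this, PySem.List.pyGetD_natCast, List.getD_eq_getElem?_getD,
    List.getElem?_append_left (by omega), List.getLast_eq_getElem]
  simp [List.getElem?_eq_getElem (by omega : q.length - 1 < q.length)]

-- A's whitespace walk, started at the end of a prefix of cs, stops exactly at rstrip(prefix)'s last index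
theorem pvALoop_eq_rstrip (cs : List Char) (pref : List Char) (h : pref <+: cs) :
    pvALoop cs ((pref.length : Int) - 1) = ((PySem.Chars.rstrip pref).length : Int) - 1 := by
  induction pref using List.reverseRecOn with
  | nil => simp [pvALoop_neg cs (-1) (by omega), PySem.Chars.rstrip]
  | append_singleton q c ih =>
    have hq : q <+: cs := (List.prefix_append q [c]).trans h
    have hget : PySem.List.pyGetD cs (((q ++ [c]).length : Int) - 1) ' ' = c := by
      have := pvGet_last_of_prefix cs (q ++ [c]) h (by simp)
      simpa using this
    by_cases hc : PySem.Chars.isspace c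
    · rw [pvALoop]
      rw [dif_pos ⟨by simp, by rw [hget]; exact hc⟩]
      have : ((q ++ [c]).length : Int) - 1 - 1 = (q.length : Int) - 1 := by simp
      rw [this, ih hq, pvRstrip_append, if_pos hc]
    · rw [pvALoop]
      rw [dif_neg (by rw [hget]; exact fun hh => hc hh.2)]
      rw [pvRstrip_append, if_neg hc]

-- ===== VERDICT (by name: the statement is the Claim_ definition above) =====
theorem is_transpose_apostrophe_py_spec : Claim_equal_is_transpose_apostrophe_py := by
  intro line index _ hpre
  unfold Spec_is_transpose_apostrophe_py
  unfold is_transpose_apostrophe_py is_transpose_apostrophe_py_alt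
  by_cases hle : index ≤ 0
  · rw [if_pos hle, pvALoop_neg _ _ (by omega), if_pos (by omega)]
  · simp only [if_neg hle]
    unfold Pre_is_transpose_apostrophe_py at hpre
    have hidx : index = ((index.toNat : Nat) : Int) := by omega
    have hslice : PySem.List.slice line.toList none (some index) = line.toList.take index.toNat := by
      conv_lhs => rw [hidx]
      rw [PySem.List.slice_to_natCast]
    rw [hslice]
    have hprefix : line.toList.take index.toNat <+: line.toList := List.take_prefix _ _
    have hlen : ((line.toList.take index.toNat).length : Int) = index := by
      rw [List.length_take]
      omega
    have hloop := pvALoop_eq_rstrip line.toList _ hprefix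
    rw [hlen] at hloop
    rw [hloop]
    by_cases hnil : PySem.Chars.rstrip (line.toList.take index.toNat) = []
    · rw [hnil]
      simp
    · have hrp : PySem.Chars.rstrip (line.toList.take index.toNat) <+: line.toList :=
        (pvRstrip_prefix _).trans hprefix
      have h1 : 1 ≤ (PySem.Chars.rstrip (line.toList.take index.toNat)).length :=
        List.length_pos_iff.mpr hnil
      rw [if_neg (by omega)]
      rw [pvGet_last_of_prefix line.toList _ hrp hnil]
      rw [List.getLast?_eq_some_getLast hnil]
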